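-- pv_equiv track=rewrite | github.com/syntax-syndicate/second-opinion | main.py | _clean_huggingface_response
-- ===== SOURCE A (Python) =====
-- def _clean_huggingface_response(response_content: str, full_prompt: str) -> str:
--     """Clean and format HuggingFace response content"""
--     if not response_content:
--         return ""
--
--     # Remove the input prompt if it's included in the response
--     if full_prompt in response_content:
--         response_content = response_content.replace(full_prompt, "").strip()
--
--     # Remove common prefixes and suffixes
--     prefixes_to_remove = [
--         "Assistant:", "AI:", "Bot:", "Response:", "Answer:",
--         "### Assistant:", "### Response:", "[/INST]", "</s>"
--     ]
--
--     for prefix in prefixes_to_remove: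
--         if response_content.startswith(prefix):
--             response_content = response_content[len(prefix):].strip()
--
--     # Remove trailing artifacts
--     suffixes_to_remove = ["</s>", "<|endoftext|>", "<|end|>", "###"]
--     for suffix in suffixes_to_remove:
--         if response_content.endswith(suffix):
--             response_content = response_content[:-len(suffix)].strip()
--
--     # Clean up excessive whitespace and newlines
--     lines = response_content.split('\n')
--     cleaned_lines = []
--     consecutive_empty = 0
--
--     for line in lines:
--         if line.strip():
--             cleaned_lines.append(line)
--             consecutive_empty = 0
--         else:
--             consecutive_empty += 1
--             if consecutive_empty <= 1:  # Allow max 1 consecutive empty line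
--                 cleaned_lines.append(line)
--
--     return '\n'.join(cleaned_lines).strip()
-- ===== SOURCE B (Python) =====
-- _AFFIX_OPS = (
--     [("p", t) for t in ["Assistant:", "AI:", "Bot:", "Response:", "Answer:",
--                         "### Assistant:", "### Response:", "[/INST]", "</s>"]]
--     + [("s", t) for t in ["</s>", "<|endoftext|>", "<|end|>", "###"]]
-- )
--
--
-- def _strip_affixes(s, ops):
--     """Recursively apply one agenda of (kind, token) strip operations."""
--     if not ops:
--         return s
--     kind, tok = ops[0]
--     if kind == "p" and s.startswith(tok):
--         s = s[len(tok):].strip()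
--     elif kind == "s" and s.endswith(tok):
--         s = s[:-len(tok)].strip()
--     return _strip_affixes(s, ops[1:])
--
--
-- def _clean_huggingface_response(response_content: str, full_prompt: str) -> str:
--     if not response_content:
--         return ""
--     s = response_content
--     if full_prompt in s:
--         s = s.replace(full_prompt, "").strip()
--     s = _strip_affixes(s, _AFFIX_OPS)
--     # keep a line iff it is non-blank or its predecessor is non-blank
--     # (the sentinel "." makes the first line always kept): stateless pairwise filter
--     lines = s.split('\n')
--     kept = [cur for prev, cur in zip(["."] + lines, lines) if cur.strip() or prev.strip()]
--     return '\n'.join(kept).strip()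
-- ===== Notes on version B (the rewrite author's own statement) =====
-- stated objective: alternative
-- what changed: A's stateful blank-line loop with a running consecutive-empty counter becomes a stateless pairwise filter (keep a line iff it or its predecessor is non-blank, via zip with a shifted copy), and the two prefix/suffix loops become one recursion over a single agenda of (kind, token) operations.
import Mathlib
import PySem

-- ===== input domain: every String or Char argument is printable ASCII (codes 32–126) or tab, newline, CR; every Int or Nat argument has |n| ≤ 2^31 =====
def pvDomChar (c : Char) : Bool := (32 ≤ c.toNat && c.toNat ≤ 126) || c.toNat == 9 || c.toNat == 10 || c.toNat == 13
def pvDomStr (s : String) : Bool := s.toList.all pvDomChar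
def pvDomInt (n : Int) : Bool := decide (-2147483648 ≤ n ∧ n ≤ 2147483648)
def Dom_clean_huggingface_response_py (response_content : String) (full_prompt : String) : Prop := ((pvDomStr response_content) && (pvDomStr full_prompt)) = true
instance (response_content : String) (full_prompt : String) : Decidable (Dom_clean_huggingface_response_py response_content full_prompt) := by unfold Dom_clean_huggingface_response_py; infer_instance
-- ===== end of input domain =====

-- B replaces A's stateful counter loop over the lines by a stateless pairwise filter
-- (keep a line iff it or its predecessor is non-blank, via zip with a shifted copy)
-- and merges the two affix loops into one recursion over a (kind, token) agenda;
-- objective: alternative decomposition, same cost.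

-- ===== PORT A =====
def clean_huggingface_response_py (response_content : String) (full_prompt : String) : String :=
  if response_content = "" then "" else
  let rc1 := if PySem.Str.isIn full_prompt response_content then
      PySem.Str.strip (PySem.Str.replace response_content full_prompt "") else response_content
  let rc2 := ["Assistant:", "AI:", "Bot:", "Response:", "Answer:",
      "### Assistant:", "### Response:", "[/INST]", "</s>"].foldl
    (fun s p => if PySem.Str.startswith s p then
        PySem.Str.strip (PySem.Str.slice s (some (PySem.Str.len p : Int)) none) else s) rc1
  let rc3 := ["</s>", "<|endoftext|>", "<|end|>", "###"].foldl
    (fun s suf => if PySem.Str.endswith s suf then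
        PySem.Str.strip (PySem.Str.slice s none (some (-(PySem.Str.len suf : Int)))) else s) rc2
  let lines := (PySem.Chars.splitOn rc3.toList ['\n']).map String.ofList
  let res := lines.foldl
    (fun (st : List String × Int) line =>
      if PySem.Str.strip line ≠ "" then (st.1 ++ [line], 0)
      else (if st.2 + 1 ≤ 1 then st.1 ++ [line] else st.1, st.2 + 1)) ([], 0)
  PySem.Str.strip (PySem.Str.join "\n" res.1)

-- ===== PORT B =====
-- the agenda of strip operations: (true, tok) = prefix op, (false, tok) = suffix op
def pvAffixOps : List (Bool × String) :=
  ["Assistant:", "AI:", "Bot:", "Response:", "Answer:",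
   "### Assistant:", "### Response:", "[/INST]", "</s>"].map (fun t => (true, t))
  ++ ["</s>", "<|endoftext|>", "<|end|>", "###"].map (fun t => (false, t))

-- _strip_affixes: recursion over the agenda
def pvStripAffixes : String → List (Bool × String) → String
  | s, [] => s
  | s, op :: ops =>
    let s' := if op.1 && PySem.Str.startswith s op.2 then
        PySem.Str.strip (PySem.Str.slice s (some (PySem.Str.len op.2 : Int)) none)
      else if !op.1 && PySem.Str.endswith s op.2 then
        PySem.Str.strip (PySem.Str.slice s none (some (-(PySem.Str.len op.2 : Int))))
      else s
    pvStripAffixes s' ops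

def clean_huggingface_response_py_alt (response_content : String) (full_prompt : String) : String :=
  if response_content = "" then "" else
  let s0 := if PySem.Str.isIn full_prompt response_content then
      PySem.Str.strip (PySem.Str.replace response_content full_prompt "") else response_content
  let s1 := pvStripAffixes s0 pvAffixOps
  let lines := (PySem.Chars.splitOn s1.toList ['\n']).map String.ofList
  let kept := (((("." :: lines).zip lines).filter
      (fun pc => PySem.Str.strip pc.2 != "" || PySem.Str.strip pc.1 != "")).map Prod.snd)
  PySem.Str.strip (PySem.Str.join "\n" kept)

-- ===== PRECONDITION & SPEC =====
def Spec_clean_huggingface_response_py (response_content : String) (full_prompt : String) (out : String) : Prop := out = clean_huggingface_response_py_alt response_content full_prompt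
instance (response_content : String) (full_prompt : String) (out : String) : Decidable (Spec_clean_huggingface_response_py response_content full_prompt out) := by unfold Spec_clean_huggingface_response_py; infer_instance

-- ===== CLAIM (what is proved, stated in full; the proofs are below) =====
def Claim_equal_clean_huggingface_response_py : Prop := ∀ (response_content : String) (full_prompt : String), Dom_clean_huggingface_response_py response_content full_prompt → Spec_clean_huggingface_response_py response_content full_prompt (clean_huggingface_response_py response_content full_prompt)

-- ===== LEMMAS AND PROOFS =====

-- the suffix tail of the agenda equals A's suffix foldl
theorem pvStripAffixes_suf (ss : List String) : ∀ s : String,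
    pvStripAffixes s (ss.map (fun t => (false, t)))
      = ss.foldl (fun s suf => if PySem.Str.endswith s suf then
          PySem.Str.strip (PySem.Str.slice s none (some (-(PySem.Str.len suf : Int)))) else s) s := by
  induction ss with
  | nil => intro s; rfl
  | cons t ts ih =>
    intro s
    simp only [List.map_cons, List.foldl_cons, pvStripAffixes, Bool.false_and, Bool.not_false,
      Bool.true_and, Bool.false_eq_true, if_false]
    rw [ih]

-- a prefix segment of the agenda equals A's prefix foldl
theorem pvStripAffixes_pre (ps : List String) (rest : List (Bool × String)) : ∀ s : String,
    pvStripAffixes s (ps.map (fun t => (true, t)) ++ rest)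
      = pvStripAffixes (ps.foldl (fun s p => if PySem.Str.startswith s p then
          PySem.Str.strip (PySem.Str.slice s (some (PySem.Str.len p : Int)) none) else s) s) rest := by
  induction ps with
  | nil => intro s; rfl
  | cons t ts ih =>
    intro s
    simp only [List.map_cons, List.cons_append, List.foldl_cons, pvStripAffixes, Bool.true_and,
      Bool.not_true, Bool.false_and, Bool.false_eq_true, if_false]
    rw [ih]

def pvBlank (l : String) : Bool := PySem.Str.strip l == ""

-- A's blank-collapsing loop, as a plain recursion on the remaining lines and the counter
def pvAGo : List String → Int → List String
  | [], _ => []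
  | l :: ls, c =>
    if PySem.Str.strip l ≠ "" then l :: pvAGo ls 0
    else if c + 1 ≤ 1 then l :: pvAGo ls (c + 1) else pvAGo ls (c + 1)

theorem pvFoldl_eq_aGo (ls : List String) : ∀ (acc : List String) (c : Int),
    (ls.foldl (fun (st : List String × Int) line =>
      if PySem.Str.strip line ≠ "" then (st.1 ++ [line], 0)
      else (if st.2 + 1 ≤ 1 then st.1 ++ [line] else st.1, st.2 + 1)) (acc, c)).1
    = acc ++ pvAGo ls c := by
  induction ls with
  | nil => intro acc c; simp [pvAGo]
  | cons l ls ih =>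
    intro acc c
    simp only [List.foldl_cons]
    by_cases h : PySem.Str.strip l ≠ ""
    · rw [if_pos h, pvAGo, if_pos h, ih]
      simp
    · rw [if_neg h, pvAGo, if_neg h]
      by_cases hc : c + 1 ≤ 1
      · rw [if_pos hc, if_pos hc, ih]
        simp
      · rw [if_neg hc, if_neg hc, ih]

-- B's pairwise filter, as a recursion carrying the previous line
def pvPwGo : String → List String → List String
  | _, [] => []
  | prev, l :: ls =>
    if pvBlank l = false ∨ pvBlank prev = false then l :: pvPwGo l ls else pvPwGo l ls

theorem pvAGo_eq_pwGo (ls : List String) : ∀ (prev : String) (c : Int),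
    0 ≤ c → (pvBlank prev = true ↔ 1 ≤ c) → pvAGo ls c = pvPwGo prev ls := by
  induction ls with
  | nil => intro prev c _ _; rfl
  | cons l ls ih =>
    intro prev c hc hinv
    by_cases h : PySem.Str.strip l ≠ ""
    · have hl : pvBlank l = false := by simpa [pvBlank] using h
      rw [pvAGo, if_pos h, pvPwGo, if_pos (Or.inl hl)]
      exact congrArg _ (ih l 0 le_rfl (by simp [hl]))
    · have hl : pvBlank l = true := by simpa [pvBlank] using h
      have hrec : pvAGo ls (c + 1) = pvPwGo l ls :=
        ih l (c + 1) (by omega) ⟨fun _ => by omega, fun _ => hl⟩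
      rw [pvAGo, if_neg h, pvPwGo]
      by_cases hp : pvBlank prev = true
      · have : ¬ c + 1 ≤ 1 := by have := hinv.mp hp; omega
        rw [if_neg this, if_neg (by simp [hl, hp]), hrec]
      · have hp' : pvBlank prev = false := by simpa using hp
        have : c + 1 ≤ 1 := by
          have : ¬ 1 ≤ c := fun h1 => hp (hinv.mpr h1)
          omega
        rw [if_pos this, if_pos (Or.inr hp'), hrec]

theorem pvZipFilter (ls : List String) : ∀ prev : String,
    ((((prev :: ls).zip ls).filter
        (fun pc => PySem.Str.strip pc.2 != "" || PySem.Str.strip pc.1 != "")).map Prod.snd)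
      = pvPwGo prev ls := by
  induction ls with
  | nil => intro prev; rfl
  | cons l ls ih =>
    intro prev
    simp only [List.zip_cons_cons, List.filter_cons]
    by_cases h : (PySem.Str.strip l != "" || PySem.Str.strip prev != "") = true
    · rw [if_pos h, List.map_cons, ih, pvPwGo,
        if_pos (by simpa [pvBlank, Bool.or_eq_true, bne_iff_ne, ← Bool.not_eq_true,
          PySem.Str.strip, beq_iff_eq] using h)]
    · rw [if_neg h, ih, pvPwGo, if_neg (by
        simpa [pvBlank, Bool.or_eq_true, bne_iff_ne, ← Bool.not_eq_true,
          PySem.Str.strip, beq_iff_eq] using h)]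

-- ===== VERDICT (by name: the statement is the Claim_ definition above) =====
theorem clean_huggingface_response_py_spec : Claim_equal_clean_huggingface_response_py := by
  intro response_content full_prompt _
  unfold Spec_clean_huggingface_response_py
  unfold clean_huggingface_response_py clean_huggingface_response_py_alt
  by_cases h : response_content = ""
  · simp [h]
  · simp only [if_neg h]
    have haff : ∀ s : String,
        pvStripAffixes s pvAffixOps
          = (["</s>", "<|endoftext|>", "<|end|>", "###"].foldl
              (fun s suf => if PySem.Str.endswith s suf then
                PySem.Str.strip (PySem.Str.slice s none (some (-(PySem.Str.len suf : Int)))) else s)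
              (["Assistant:", "AI:", "Bot:", "Response:", "Answer:",
                "### Assistant:", "### Response:", "[/INST]", "</s>"].foldl
                (fun s p => if PySem.Str.startswith s p then
                  PySem.Str.strip (PySem.Str.slice s (some (PySem.Str.len p : Int)) none) else s) s)) := by
      intro s
      rw [show pvAffixOps = ["Assistant:", "AI:", "Bot:", "Response:", "Answer:",
            "### Assistant:", "### Response:", "[/INST]", "</s>"].map (fun t => (true, t))
          ++ ["</s>", "<|endoftext|>", "<|end|>", "###"].map (fun t => (false, t)) from rfl,
        pvStripAffixes_pre, pvStripAffixes_suf]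
    rw [← haff]
    apply congrArg
    apply congrArg
    rw [pvFoldl_eq_aGo, List.nil_append,
      pvAGo_eq_pwGo _ "." 0 le_rfl (by decide),
      ← pvZipFilter]
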